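-- pv_equiv track=rewrite | github.com/negin-mgdm/leetcode-challenges | Easy Problems/Uncommon_Words_from_Two_Sentences.py | uncommonFromSentences1
-- ===== SOURCE A (Python) =====
-- def uncommonFromSentences1(s1, s2):
--     """
--     :type s1: str
--     :type s2: str
--     :rtype: List[str]
--     """
--     words1 = s1.split()
--     words2 = s2.split()
--
--     arr = words1 + words2
--
--     count = {}
--
--     for word in arr:
--         if word in count:
--             count[word] += 1
--         else:
--             count[word] = 1
--
--     uncommon_words = []
--     for key, value in count.items():
--         if value == 1:
--             uncommon_words.append(key)
--
--     return uncommon_words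
-- ===== SOURCE B (Python) =====
-- def uncommonFromSentences1(s1, s2):
--     """
--     :type s1: str
--     :type s2: str
--     :rtype: List[str]
--     """
--     arr = s1.split() + s2.split()
--     seen = set()
--     multiple = set()
--     for w in arr:
--         if w in seen:
--             multiple.add(w)
--         else:
--             seen.add(w)
--     return [w for w in arr if w not in multiple]
-- ===== Notes on version B (the rewrite author's own statement) =====
-- stated objective: alternative
-- what changed: Replaces the dict of counts plus a scan over dict.items() by a single pass maintaining two sets (seen / seen-more-than-once) and a final filter of the word list itself, which preserves first-occurrence order without a dict.
import Mathlib
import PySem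

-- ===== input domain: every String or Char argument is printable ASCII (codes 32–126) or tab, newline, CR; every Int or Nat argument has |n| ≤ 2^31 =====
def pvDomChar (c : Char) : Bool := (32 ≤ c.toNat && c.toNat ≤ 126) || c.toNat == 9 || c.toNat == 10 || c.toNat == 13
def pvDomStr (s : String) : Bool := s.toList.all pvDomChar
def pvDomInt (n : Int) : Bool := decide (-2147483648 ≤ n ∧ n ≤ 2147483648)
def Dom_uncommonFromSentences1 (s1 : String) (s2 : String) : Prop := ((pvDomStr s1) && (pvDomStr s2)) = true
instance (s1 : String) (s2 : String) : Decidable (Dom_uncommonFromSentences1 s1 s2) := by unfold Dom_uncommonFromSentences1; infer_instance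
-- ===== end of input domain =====

-- B replaces A's dict of counts + dict.items() scan by one pass with two sets and a final filter of the word list (alternative decomposition, same cost).

-- ===== PORT A =====
def uncommonFromSentences1 (s1 : String) (s2 : String) : List String :=
  let words1 := PySem.Str.split₀ s1
  let words2 := PySem.Str.split₀ s2
  let arr := words1 ++ words2
  let count := arr.foldl
    (fun (c : PySem.Dict String Int) word =>
      if c.contains word then c.modify word 0 (· + 1) else c.insert word 1)
    PySem.Dict.empty
  count.items.foldl
    (fun uncommon kv => if kv.2 == 1 then uncommon ++ [kv.1] else uncommon) []

-- ===== PORT B =====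
def uncommonFromSentences1_alt (s1 : String) (s2 : String) : List String :=
  let arr := PySem.Str.split₀ s1 ++ PySem.Str.split₀ s2
  let st := arr.foldl
    (fun (st : PySem.Set String × PySem.Set String) w =>
      if PySem.Set.contains st.1 w then (st.1, PySem.Set.add st.2 w)
      else (PySem.Set.add st.1 w, st.2))
    (PySem.Set.empty, PySem.Set.empty)
  arr.filter (fun w => !(PySem.Set.contains st.2 w))

-- ===== PRECONDITION & SPEC =====
def Spec_uncommonFromSentences1 (s1 : String) (s2 : String) (out : List String) : Prop := out = uncommonFromSentences1_alt s1 s2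
instance (s1 : String) (s2 : String) (out : List String) : Decidable (Spec_uncommonFromSentences1 s1 s2 out) := by unfold Spec_uncommonFromSentences1; infer_instance

-- ===== CLAIM (what is proved, stated in full; the proofs are below) =====
def Claim_equal_uncommonFromSentences1 : Prop := ∀ (s1 : String) (s2 : String), Dom_uncommonFromSentences1 s1 s2 → Spec_uncommonFromSentences1 s1 s2 (uncommonFromSentences1 s1 s2)

-- ===== LEMMAS AND PROOFS =====

-- A's counting step (branch on membership) is exactly Counter's modify step.
theorem stepA_eq_counter_step :
    (fun (c : PySem.Dict String Int) word =>
      if c.contains word then c.modify word 0 (· + 1) else c.insert word 1)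
    = fun (c : PySem.Dict String Int) word => c.modify word 0 (· + 1) := by
  funext c w
  by_cases h : c.contains w
  · simp [h]
  · simp only [Bool.not_eq_true] at h
    simp [h, PySem.Dict.modify, PySem.Dict.getD_of_not_contains c 0 h]


-- B's loop: the "multiple" set holds exactly the words seen at least twice.
theorem multiple_mem (l : List String) :
    ∀ (seen mult : PySem.Set String) (w : String),
      (w ∈ (l.foldl
        (fun (st : PySem.Set String × PySem.Set String) w =>
          if PySem.Set.contains st.1 w then (st.1, PySem.Set.add st.2 w)
          else (PySem.Set.add st.1 w, st.2)) (seen, mult)).2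
        ↔ w ∈ mult ∨ (w ∈ seen ∧ w ∈ l) ∨ 2 ≤ l.count w) := by
  induction l with
  | nil => intro seen mult w; simp
  | cons a t ih =>
    intro seen mult w
    simp only [List.foldl_cons]
    by_cases hc : a ∈ seen
    · have hcb : PySem.Set.contains seen a = true := by
        simpa [PySem.Set.contains, List.contains_iff_mem] using hc
      simp only [hcb, if_true]
      rw [ih]
      simp only [PySem.Set.mem_add, List.mem_cons, List.count_cons]
      by_cases hw : w = a
      · subst hw; simp [hc]
      · simp [hw, Ne.symm hw]
    · have hcb : PySem.Set.contains seen a = false := by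
        simp [PySem.Set.contains, hc]
      simp only [hcb, Bool.false_eq_true, if_false]
      rw [ih]
      simp only [PySem.Set.mem_add, List.mem_cons, List.count_cons]
      by_cases hw : w = a
      · subst hw
        have h1 : w ∈ t ↔ 0 < t.count w := List.count_pos_iff.symm
        simp only [hc, false_or, beq_self_eq_true, if_true, and_true, or_true, true_or, h1]
        constructor
        · rintro (h | ⟨-, h⟩ | h)
          · exact Or.inl h
          · right; omega
          · right; omega
        · rintro (h | h)
          · exact Or.inl h
          · right; exact Or.inl ⟨trivial, by omega⟩
      · simp [hw, Ne.symm hw]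


-- Filtering the first-occurrence dedup by a predicate that only accepts words
-- occurring at most once agrees with filtering the list itself.
theorem filter_foldl_add (p : String → Bool) (l : List String) :
    ∀ (seen : List String),
      (∀ w, p w = true → l.count w ≤ 1 ∧ (w ∈ seen → w ∉ l)) →
      List.filter p (l.foldl PySem.Set.add seen) = seen.filter p ++ l.filter p := by
  induction l with
  | nil => intro seen h; simp
  | cons a t ih =>
    intro seen h
    simp only [List.foldl_cons]
    by_cases hp : p a = true
    · have ha : a ∉ seen := fun hs => (h a hp).2 hs (List.mem_cons_self)
      have hat : a ∉ t := by
        have h1 := (h a hp).1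
        rw [List.count_cons] at h1
        simp only [beq_self_eq_true, if_true] at h1
        exact fun hmem => absurd (List.count_pos_iff.mpr hmem) (by omega)
      have hadd : PySem.Set.add seen a = seen ++ [a] := by
        simp [PySem.Set.add, PySem.Set.contains, ha]
      rw [hadd, ih (seen ++ [a]) ?_]
      · simp [List.filter_append, hp]
      · intro w hw
        obtain ⟨hc1, hc2⟩ := h w hw
        rw [List.count_cons] at hc1
        refine ⟨by omega, ?_⟩
        intro hmem
        rcases List.mem_append.mp hmem with hs | hs
        · exact fun hwt => hc2 hs (List.mem_cons_of_mem _ hwt)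
        · simp at hs; subst hs; exact hat
    · have hstep : List.filter p (PySem.Set.add seen a) = List.filter p seen := by
        by_cases hca : a ∈ seen
        · simp [PySem.Set.add, PySem.Set.contains, hca]
        · simp [PySem.Set.add, PySem.Set.contains, hca, List.filter_append, hp]
      have hind : ∀ w, p w = true → t.count w ≤ 1 ∧ (w ∈ PySem.Set.add seen a → w ∉ t) := by
        intro w hw
        obtain ⟨hc1, hc2⟩ := h w hw
        rw [List.count_cons] at hc1
        have hwa : w ≠ a := fun he => by subst he; rw [hw] at hp; exact hp rfl
        refine ⟨by omega, ?_⟩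
        intro hmem
        have hws : w ∈ seen := by
          rcases (PySem.Set.mem_add seen a w).mp hmem with hs | hs
          · exact hs
          · exact absurd hs hwa
        exact fun hwt => hc2 hws (List.mem_cons_of_mem _ hwt)
      rw [ih (PySem.Set.add seen a) hind, hstep]
      simp [hp]


-- The two ports agree on any word list.
theorem ports_agree (arr : List String) :
    (arr.foldl
      (fun (c : PySem.Dict String Int) word =>
        if c.contains word then c.modify word 0 (· + 1) else c.insert word 1)
      PySem.Dict.empty).items.foldl
      (fun uncommon kv => if kv.2 == 1 then uncommon ++ [kv.1] else uncommon) []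
    = arr.filter (fun w => !(PySem.Set.contains (arr.foldl
        (fun (st : PySem.Set String × PySem.Set String) w =>
          if PySem.Set.contains st.1 w then (st.1, PySem.Set.add st.2 w)
          else (PySem.Set.add st.1 w, st.2)) (PySem.Set.empty, PySem.Set.empty)).2 w)) := by
  rw [stepA_eq_counter_step, ← PySem.Dict.counter_eq_foldl, PySem.Dict.items_counter,
    PySem.List.foldl_append_if _ _, List.filter_map]
  simp only [List.nil_append, List.map_map]
  have hq : ((fun kv : String × Int => kv.2 == 1) ∘ fun k => (k, (List.count k arr : Int)))
      = fun k => ((List.count k arr : Int) == 1) := rfl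
  rw [hq]
  have hmap : ((fun kv : String × Int => kv.1) ∘ fun k => (k, (List.count k arr : Int)))
      = id := rfl
  rw [hmap, List.map_id]
  have hB : arr.filter (fun w => !(PySem.Set.contains (arr.foldl
        (fun (st : PySem.Set String × PySem.Set String) w =>
          if PySem.Set.contains st.1 w then (st.1, PySem.Set.add st.2 w)
          else (PySem.Set.add st.1 w, st.2)) (PySem.Set.empty, PySem.Set.empty)).2 w))
      = arr.filter (fun k => ((List.count k arr : Int) == 1)) := by
    apply List.filter_congr
    intro w hw
    have hmem := multiple_mem arr PySem.Set.empty PySem.Set.empty w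
    simp only [PySem.Set.empty, List.not_mem_nil, false_and, false_or] at hmem
    have hpos : 0 < List.count w arr := List.count_pos_iff.mpr hw
    simp only [PySem.Set.empty]
    have hc : (PySem.Set.contains (arr.foldl
        (fun (st : PySem.Set String × PySem.Set String) w =>
          if PySem.Set.contains st.1 w then (st.1, PySem.Set.add st.2 w)
          else (PySem.Set.add st.1 w, st.2)) (([] : PySem.Set String), ([] : PySem.Set String))).2 w) = true
        ↔ 2 ≤ List.count w arr := by
      rw [PySem.Set.contains, List.contains_iff_mem, hmem]
    cases hCb : (PySem.Set.contains (arr.foldl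
        (fun (st : PySem.Set String × PySem.Set String) w =>
          if PySem.Set.contains st.1 w then (st.1, PySem.Set.add st.2 w)
          else (PySem.Set.add st.1 w, st.2)) (([] : PySem.Set String), ([] : PySem.Set String))).2 w)
    · have h2 : ¬ 2 ≤ List.count w arr := fun h => by rw [← hc] at h; rw [h] at hCb; cases hCb
      simp only [Bool.not_false]
      symm; rw [beq_iff_eq]
      exact_mod_cast (by omega : List.count w arr = 1)
    · have h2 := hc.mp hCb
      simp only [Bool.not_true]
      symm; rw [beq_eq_false_iff_ne]
      intro he
      have : List.count w arr = 1 := by exact_mod_cast he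
      omega
  rw [hB]
  rw [PySem.Set.ofList_eq_foldl,
    filter_foldl_add (fun k => ((List.count k arr : Int) == 1)) arr [] ?_]
  · simp
  · intro w hw
    simp only [beq_iff_eq] at hw
    exact ⟨by omega, by simp⟩


-- ===== VERDICT (by name: the statement is the Claim_ definition above) =====
theorem uncommonFromSentences1_spec : Claim_equal_uncommonFromSentences1 := by
  intro s1 s2 _
  unfold Spec_uncommonFromSentences1 uncommonFromSentences1 uncommonFromSentences1_alt
  exact ports_agree _
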